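-- pv_equiv track=rewrite | github.com/samahm02/IN3110 | assignment4/fetch_olympic_statistics.py | find_best_country_in_sport
-- ===== SOURCE A (Python) =====
-- def find_best_country_in_sport(
--     results: dict[str, dict[str, int]], medal: str = "Gold"
-- ) -> str:
--     """Given a dictionary with medal stats in a given sport for the Scandinavian countries, return the country
--         that has received the most of the given `medal`.
--
--     Parameters:
--         - results (dict) : a dictionary of country specific medal results in a given sport. The format is:
--                         {"Norway" : {"Gold" : 1, "Silver" : 2, "Bronze" : 3},
--                          "Sweden" : {"Gold" : 1, ....},
--                          "Denmark" : ...
--                         }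
--         - medal (str) : medal type to compare for. Valid parameters: ["Gold" | "Silver" |"Bronze"]. Should be used as a key
--                           to the medal dictionary.
--     Returns:
--         - best (str) : name of the country(ies) leading in number of gold medals in the given sport
--                        If one country leads only, return its name, like for instance 'Norway'
--                        If two countries lead return their names separated with '/' like 'Norway/Sweden'
--                        If all or none of the countries lead, return string 'None'
--     """
--     valid_medals = {"Gold", "Silver", "Bronze"}
--     if medal not in valid_medals:
--         raise ValueError(f"{medal} is an invalid parameter for ranking, must be in {valid_medals}")
--
--     max_medal_count = -1
--     best_countries = []
--
--     for country, medal_stats in results.items():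
--         medal_count = medal_stats[medal]
--         if medal_count > max_medal_count:
--             max_medal_count = medal_count
--             best_countries = [country]
--         elif medal_count == max_medal_count:
--             best_countries.append(country)
--
--     if not best_countries or best_countries == list(results.keys()):
--         return "None"
--     elif len(best_countries) == 1:
--         return best_countries[0]
--     else:
--         return "/".join(best_countries)
-- ===== SOURCE B (Python) =====
-- def find_best_country_in_sport(results, medal="Gold"):
--     valid_medals = {"Gold", "Silver", "Bronze"}
--     if medal not in valid_medals:
--         raise ValueError(f"{medal} is an invalid parameter for ranking, must be in {valid_medals}")
--     if not results:
--         return "None"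
--     max_count = max(stats[medal] for stats in results.values())
--     best = [country for country, stats in results.items() if stats[medal] == max_count]
--     if best == list(results.keys()):
--         return "None"
--     if len(best) == 1:
--         return best[0]
--     return "/".join(best)
-- ===== Notes on version B (the rewrite author's own statement) =====
-- stated objective: idiomatic
-- what changed: Replaces A's single-pass running-max/argmax accumulator (seeded with the sentinel -1) by the idiomatic two-pass max()-then-filter formulation with an explicit empty-dict guard.
-- intended difference: When every country's count of the requested medal is <= -2, the counts are not all equal, and some leading country is not literally named 'None', A's -1 sentinel leaves best_countries empty so A returns 'None', while B returns the actual leading country(ies), which is the intended answer. — e.g. on find_best_country_in_sport([("Norway", [("Gold", -2)]), ("Sweden", [("Gold", -3)])], "Gold"): A returns "None", B returns "Norway"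
import Mathlib
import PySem

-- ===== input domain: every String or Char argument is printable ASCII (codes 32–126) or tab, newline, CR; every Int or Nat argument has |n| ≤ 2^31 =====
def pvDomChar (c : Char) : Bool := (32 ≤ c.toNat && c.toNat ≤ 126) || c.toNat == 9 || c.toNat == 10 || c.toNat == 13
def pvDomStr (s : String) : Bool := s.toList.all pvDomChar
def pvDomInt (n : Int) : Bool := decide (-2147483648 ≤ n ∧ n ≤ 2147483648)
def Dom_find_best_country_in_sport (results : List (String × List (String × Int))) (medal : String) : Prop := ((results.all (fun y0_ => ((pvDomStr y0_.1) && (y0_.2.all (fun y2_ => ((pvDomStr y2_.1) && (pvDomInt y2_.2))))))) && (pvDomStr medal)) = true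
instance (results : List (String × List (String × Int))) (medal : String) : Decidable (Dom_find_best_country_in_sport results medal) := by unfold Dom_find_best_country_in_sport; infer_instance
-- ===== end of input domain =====

-- B replaces A's single-pass running-max accumulator (sentinel -1) by the idiomatic
-- max()-then-filter formulation; on all-counts ≤ -2 (not all equal) A's sentinel is wrong, see D_.

-- the argument dict, under the association-list convention (outer and inner dicts)
def pvDictOf (results : List (String × List (String × Int))) : PySem.Dict String (PySem.Dict String Int) :=
  PySem.Dict.ofList (results.map (fun p => (p.1, PySem.Dict.ofList p.2)))

-- medal_stats[medal]; the KeyError case (medal absent) is excluded by Pre_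
def pvCnt (medal : String) (p : String × PySem.Dict String Int) : Int :=
  (PySem.Dict.get? p.2 medal).getD 0

-- ===== PORT A =====
-- loop body of A: running max and list of best countries
def pvStep (medal : String) (st : Int × List String) (p : String × PySem.Dict String Int) : Int × List String :=
  let medal_count := pvCnt medal p
  if medal_count > st.1 then (medal_count, [p.1])
  else if medal_count = st.1 then (st.1, st.2 ++ [p.1])
  else st

def find_best_country_in_sport (results : List (String × List (String × Int))) (medal : String) : String :=
  -- 'if medal not in valid_medals: raise ValueError' : excluded by Pre_
  let d := pvDictOf results
  let st := d.items.foldl (pvStep medal) (-1, [])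
  let best_countries := st.2
  if best_countries = [] ∨ best_countries = d.keys then "None"
  else if best_countries.length = 1 then best_countries.headD ""
  else PySem.Str.join "/" best_countries

-- ===== PORT B =====
def find_best_country_in_sport_alt (results : List (String × List (String × Int))) (medal : String) : String :=
  -- 'if medal not in valid_medals: raise ValueError' : excluded by Pre_
  let d := pvDictOf results
  -- 'if not results: return "None"' then 'max(...)': empty guard = the none case of max?
  match PySem.List.max? (d.items.map (pvCnt medal)) (fun c => c) with
  | none => "None"
  | some max_count =>
    let best := (d.items.filter (fun p => pvCnt medal p == max_count)).map (fun p => p.1)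
    if best = d.keys then "None"
    else if best.length = 1 then best.headD ""
    else PySem.Str.join "/" best

-- ===== PRECONDITION & SPEC =====
-- Pre_ = exactly where the Python A returns: valid medal name and every country's stats contain the medal key
def Pre_find_best_country_in_sport (results : List (String × List (String × Int))) (medal : String) : Prop :=
  (medal = "Gold" ∨ medal = "Silver" ∨ medal = "Bronze") ∧
  ∀ p ∈ results, medal ∈ p.2.map Prod.fst

instance (results : List (String × List (String × Int))) (medal : String) : Decidable (Pre_find_best_country_in_sport results medal) := by unfold Pre_find_best_country_in_sport; infer_instance

def pvWitness_find_best_country_in_sport : (List (String × List (String × Int))) × String :=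
  ([("Norway", [("Gold", 1)]), ("Sweden", [("Gold", 3)])], "Gold")

-- When every country's count of the requested medal is ≤ -2, the counts are not all equal, and
-- some leading country is not literally named "None" (so the answers can differ), A's -1 sentinel
-- leaves best_countries empty so A returns "None", while B returns the actual leading
-- country(ies), which is the intended answer.
def D_find_best_country_in_sport (results : List (String × List (String × Int))) (medal : String) : Prop :=
  let l := (pvDictOf results).items
  ∃ p ∈ l, p.1 ≠ "None" ∧ pvCnt medal p ≤ -2 ∧
    (∀ r ∈ l, pvCnt medal r ≤ pvCnt medal p) ∧ ∃ r ∈ l, pvCnt medal r ≠ pvCnt medal p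

instance (results : List (String × List (String × Int))) (medal : String) : Decidable (D_find_best_country_in_sport results medal) := by unfold D_find_best_country_in_sport; infer_instance

def Spec_find_best_country_in_sport (results : List (String × List (String × Int))) (medal : String) (out : String) : Prop := ¬ D_find_best_country_in_sport results medal → out = find_best_country_in_sport_alt results medal
instance (results : List (String × List (String × Int))) (medal : String) (out : String) : Decidable (Spec_find_best_country_in_sport results medal out) := by unfold Spec_find_best_country_in_sport; infer_instance

def pvDiffWitness_find_best_country_in_sport : (List (String × List (String × Int))) × String :=
  ([("Norway", [("Gold", -2)]), ("Sweden", [("Gold", -3)])], "Gold")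
def pvDiffWitnessOut_find_best_country_in_sport : String × String := ("None", "Norway")

-- ===== CLAIM (what is proved, stated in full; the proofs are below) =====
def Claim_unchanged_find_best_country_in_sport : Prop := ∀ (results : List (String × List (String × Int))) (medal : String), Dom_find_best_country_in_sport results medal → Pre_find_best_country_in_sport results medal → Spec_find_best_country_in_sport results medal (find_best_country_in_sport results medal)
def Claim_changed_find_best_country_in_sport : Prop := Dom_find_best_country_in_sport (pvDiffWitness_find_best_country_in_sport.1) (pvDiffWitness_find_best_country_in_sport.2) ∧ Pre_find_best_country_in_sport (pvDiffWitness_find_best_country_in_sport.1) (pvDiffWitness_find_best_country_in_sport.2) ∧ D_find_best_country_in_sport (pvDiffWitness_find_best_country_in_sport.1) (pvDiffWitness_find_best_country_in_sport.2) ∧ find_best_country_in_sport (pvDiffWitness_find_best_country_in_sport.1) (pvDiffWitness_find_best_country_in_sport.2) = pvDiffWitnessOut_find_best_country_in_sport.1 ∧ find_best_country_in_sport_alt (pvDiffWitness_find_best_country_in_sport.1) (pvDiffWitness_find_best_country_in_sport.2) = pvDiffWitnessOut_find_best_country_in_sport.2 ∧ pvDiffWitnessOut_find_best_country_in_sport.1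 ≠ pvDiffWitnessOut_find_best_country_in_sport.2
def Claim_exact_find_best_country_in_sport : Prop := ∀ (results : List (String × List (String × Int))) (medal : String), Dom_find_best_country_in_sport results medal → Pre_find_best_country_in_sport results medal → D_find_best_country_in_sport results medal → find_best_country_in_sport results medal ≠ find_best_country_in_sport_alt results medal

-- ===== LEMMAS AND PROOFS =====

-- running max over a projection, splitting the seed
lemma foldl_max_split (l : List Int) (a b : Int) :
    l.foldl max (max a b) = max a (l.foldl max b) := by
  induction l generalizing b with
  | nil => rfl
  | cons x t ih => simp only [List.foldl_cons, max_assoc, ih]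

-- invariant of A's loop
lemma loop_spec (medal : String) (l : List (String × PySem.Dict String Int)) :
    ∀ (m : Int) (b : List String),
    l.foldl (pvStep medal) (m, b) =
      (l.foldl (fun acc p => max acc (pvCnt medal p)) m,
       (if m = l.foldl (fun acc p => max acc (pvCnt medal p)) m then b else []) ++
         (l.filter (fun p => pvCnt medal p == l.foldl (fun acc p => max acc (pvCnt medal p)) m)).map Prod.fst) := by
  induction l with
  | nil => intro m b; simp
  | cons p t ih =>
    intro m b
    have hle : ∀ (a : Int), a ≤ t.foldl (fun acc q => max acc (pvCnt medal q)) a :=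
      fun a => (PySem.List.le_foldl_max_int t (pvCnt medal) a).1
    simp only [List.foldl_cons, pvStep]
    rcases lt_trichotomy (pvCnt medal p) m with h | h | h
    · -- skipped element
      rw [if_neg (by omega), if_neg (by omega)]
      have hmax : max m (pvCnt medal p) = m := max_eq_left (le_of_lt h)
      simp only [hmax]; rw [ih m b]
      have hne : ¬ (pvCnt medal p == t.foldl (fun acc q => max acc (pvCnt medal q)) m) := by
        have := hle m; simp only [beq_iff_eq]; omega
      simp [hne]
    · -- equal: append
      rw [if_neg (by omega), if_pos h]
      have hmax : max m (pvCnt medal p) = m := by omega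
      simp only [hmax]; rw [ih m (b ++ [p.1])]
      simp only [List.filter_cons]
      by_cases hM : m = t.foldl (fun acc q => max acc (pvCnt medal q)) m
      · rw [if_pos hM, if_pos hM, if_pos (show (pvCnt medal p == _) = true from beq_iff_eq.mpr (h.trans hM))]
        simp
      · rw [if_neg hM, if_neg hM, if_neg (show ¬ (pvCnt medal p == _) = true by simp only [beq_iff_eq]; omega)]
    · -- new max
      rw [if_pos h]
      have hmax : max m (pvCnt medal p) = pvCnt medal p := max_eq_right (le_of_lt h)
      simp only [hmax]; rw [ih (pvCnt medal p) [p.1]]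
      have hM : ¬ m = t.foldl (fun acc q => max acc (pvCnt medal q)) (pvCnt medal p) := by
        have := hle (pvCnt medal p); omega
      simp only [List.filter_cons]
      rw [if_neg hM]
      by_cases hc : pvCnt medal p = t.foldl (fun acc q => max acc (pvCnt medal q)) (pvCnt medal p)
      · rw [if_pos hc, if_pos (show (pvCnt medal p == _) = true from beq_iff_eq.mpr hc)]
        simp
      · rw [if_neg hc, if_neg (show ¬ (pvCnt medal p == _) = true by simp only [beq_iff_eq]; omega)]

-- ===== VERDICT (by name: the statement is the Claim_ definition above) =====
-- "/".join of at least two parts contains '/' and thus is never the string "None"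
lemma join_ne_none (a b : String) (r : List String) : PySem.Str.join "/" (a :: b :: r) ≠ "None" := by
  intro h
  have h2 := congrArg String.toList h
  rw [PySem.Str.toList_join, List.map_cons, List.map_cons, PySem.Chars.join_cons_cons] at h2
  have hmem : '/' ∈ a.toList ++ "/".toList ++ PySem.Chars.join "/".toList (b.toList :: r.map String.toList) :=
    List.mem_append.mpr (Or.inl (List.mem_append.mpr (Or.inr (by decide))))
  rw [h2] at hmem
  exact absurd hmem (by decide)

lemma pvMainAux (medal : String) (hvalid : medal = "Gold" ∨ medal = "Silver" ∨ medal = "Bronze")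
    (l : List (String × PySem.Dict String Int))
    (hnd : (l.map Prod.fst).Nodup)
    (hD : ¬((medal = "Gold" ∨ medal = "Silver" ∨ medal = "Bronze") ∧
        (∀ c ∈ l.map (pvCnt medal), c ≤ -2) ∧
        (∃ c ∈ l.map (pvCnt medal), ∃ c' ∈ l.map (pvCnt medal), c ≠ c') ∧
        ∃ p ∈ l, p.1 ≠ "None" ∧ ∀ r ∈ l, pvCnt medal r ≤ pvCnt medal p)) :
    (if (l.filter (fun p => pvCnt medal p ==
            l.foldl (fun acc p => max acc (pvCnt medal p)) (-1))).map Prod.fst = [] ∨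
        (l.filter (fun p => pvCnt medal p ==
            l.foldl (fun acc p => max acc (pvCnt medal p)) (-1))).map Prod.fst = l.map Prod.fst
     then "None"
     else if ((l.filter (fun p => pvCnt medal p ==
            l.foldl (fun acc p => max acc (pvCnt medal p)) (-1))).map Prod.fst).length = 1
     then ((l.filter (fun p => pvCnt medal p ==
            l.foldl (fun acc p => max acc (pvCnt medal p)) (-1))).map Prod.fst).headD ""
     else PySem.Str.join "/" ((l.filter (fun p => pvCnt medal p ==
            l.foldl (fun acc p => max acc (pvCnt medal p)) (-1))).map Prod.fst)) =
    (match PySem.List.max? (l.map (pvCnt medal)) (fun c => c) with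
     | none => "None"
     | some max_count =>
       if (l.filter (fun p => pvCnt medal p == max_count)).map Prod.fst = l.map Prod.fst then "None"
       else if ((l.filter (fun p => pvCnt medal p == max_count)).map Prod.fst).length = 1
       then ((l.filter (fun p => pvCnt medal p == max_count)).map Prod.fst).headD ""
       else PySem.Str.join "/" ((l.filter (fun p => pvCnt medal p == max_count)).map Prod.fst)) := by
  cases l with
  | nil => simp [PySem.List.max?]
  | cons q t =>
    simp only [List.map_cons]
    rw [PySem.List.max?_id_cons]
    have hMval : (q :: t).foldl (fun acc p => max acc (pvCnt medal p)) (-1)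
        = max (-1) ((t.map (pvCnt medal)).foldl max (pvCnt medal q)) := by
      have h1 : ((q :: t).map (pvCnt medal)).foldl max (-1)
          = (q :: t).foldl (fun acc p => max acc (pvCnt medal p)) (-1) := by rw [List.foldl_map]
      rw [← h1, List.map_cons, List.foldl_cons, foldl_max_split]
    simp only [hMval]
    have hmx : PySem.List.max? ((q :: t).map (pvCnt medal)) (fun c => c)
        = some ((t.map (pvCnt medal)).foldl max (pvCnt medal q)) := by
      rw [List.map_cons, PySem.List.max?_id_cons]
    have hmem : (t.map (pvCnt medal)).foldl max (pvCnt medal q) ∈ (q :: t).map (pvCnt medal) :=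
      PySem.List.max?_mem hmx
    by_cases hge : (-1 : Int) ≤ (t.map (pvCnt medal)).foldl max (pvCnt medal q)
    · simp only [max_eq_right hge]
      obtain ⟨p, hp, hpc⟩ := List.mem_map.mp hmem
      have hbne : ((q :: t).filter
          (fun p => pvCnt medal p == (t.map (pvCnt medal)).foldl max (pvCnt medal q))).map Prod.fst ≠ [] := by
        have hin : p ∈ (q :: t).filter
            (fun p => pvCnt medal p == (t.map (pvCnt medal)).foldl max (pvCnt medal q)) :=
          List.mem_filter.mpr ⟨hp, beq_iff_eq.mpr hpc⟩
        intro hcontra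
        rw [List.map_eq_nil_iff] at hcontra
        rw [hcontra] at hin
        exact List.not_mem_nil hin
      rw [if_congr (or_iff_right hbne) rfl rfl]
      rfl
    · have hall : ∀ y ∈ (q :: t).map (pvCnt medal), y ≤ (t.map (pvCnt medal)).foldl max (pvCnt medal q) :=
        PySem.List.max?_isMax hmx
      have hm2 : (t.map (pvCnt medal)).foldl max (pvCnt medal q) ≤ -2 := by
        have := hall (pvCnt medal q) (List.mem_map_of_mem (List.mem_cons_self ..))
        omega
      simp only [max_eq_left (show (t.map (pvCnt medal)).foldl max (pvCnt medal q) ≤ (-1 : Int) by omega)]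
      have hfilA : (q :: t).filter (fun p => pvCnt medal p == (-1 : Int)) = [] := by
        rw [List.filter_eq_nil_iff]
        intro p hp
        have := hall (pvCnt medal p) (List.mem_map_of_mem hp)
        simp only [beq_iff_eq]
        omega
      have hAll2 : ∀ c ∈ (q :: t).map (pvCnt medal), c ≤ -2 :=
        fun c hc => le_trans (hall c hc) hm2
      rw [hfilA, if_pos (Or.inl (by simp))]
      by_cases hdist : ∃ c ∈ (q :: t).map (pvCnt medal), ∃ c' ∈ (q :: t).map (pvCnt medal), c ≠ c'
      · -- counts not all equal, but every leader is the country named "None": B also returns "None"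
        have hargNone : ∀ p ∈ q :: t,
            pvCnt medal p = (t.map (pvCnt medal)).foldl max (pvCnt medal q) → p.1 = "None" := by
          intro p hp hpm
          by_contra hpn
          exact hD ⟨hvalid, hAll2, hdist, ⟨p, hp, hpn, fun r hr => by
            have := hall (pvCnt medal r) (List.mem_map_of_mem hr)
            omega⟩⟩
        obtain ⟨p0, hp0, hp0c⟩ := List.mem_map.mp hmem
        have hp0F : p0 ∈ (q :: t).filter
            (fun p => pvCnt medal p == (t.map (pvCnt medal)).foldl max (pvCnt medal q)) :=
          List.mem_filter.mpr ⟨hp0, beq_iff_eq.mpr hp0c⟩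
        have hFkeys : ∀ s ∈ ((q :: t).filter
            (fun p => pvCnt medal p == (t.map (pvCnt medal)).foldl max (pvCnt medal q))).map Prod.fst,
            s = "None" := by
          intro s hs
          obtain ⟨r, hrF, rfl⟩ := List.mem_map.mp hs
          obtain ⟨hr, hrc⟩ := List.mem_filter.mp hrF
          exact hargNone r hr (beq_iff_eq.mp hrc)
        have hndF : (((q :: t).filter
            (fun p => pvCnt medal p == (t.map (pvCnt medal)).foldl max (pvCnt medal q))).map Prod.fst).Nodup :=
          ((List.filter_sublist).map Prod.fst).nodup hnd
        have hFeq : ((q :: t).filter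
            (fun p => pvCnt medal p == (t.map (pvCnt medal)).foldl max (pvCnt medal q))).map Prod.fst
            = ["None"] := by
          have hp0m : p0.1 ∈ ((q :: t).filter
              (fun p => pvCnt medal p == (t.map (pvCnt medal)).foldl max (pvCnt medal q))).map Prod.fst :=
            List.mem_map_of_mem hp0F
          revert hp0m hFkeys hndF
          cases hF : ((q :: t).filter
              (fun p => pvCnt medal p == (t.map (pvCnt medal)).foldl max (pvCnt medal q))).map Prod.fst with
          | nil => intro _ _ hm; exact absurd hm List.not_mem_nil
          | cons sx rest =>
            intro hk hnd2 _
            cases rest with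
            | nil => rw [hk sx (List.mem_cons_self ..)]
            | cons sy r2 =>
              exfalso
              have h1 : sx = "None" := hk sx (List.mem_cons_self ..)
              have h2 : sy = "None" := hk sy (List.mem_cons_of_mem _ (List.mem_cons_self ..))
              have := (List.nodup_cons.mp hnd2).1
              rw [h1, h2] at this
              exact this (List.mem_cons_self ..)
        rw [hFeq]
        cases t with
        | nil =>
          obtain ⟨c, hc, c', hc', hne⟩ := hdist
          simp only [List.map_cons, List.map_nil, List.mem_singleton] at hc hc'
          exact absurd (hc.trans hc'.symm) hne
        | cons b t' =>
          rw [if_neg (fun h => by simpa using congrArg List.length h)]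
          rfl
      · -- counts all equal: every country leads, B also returns "None"
        have heq : ∀ c ∈ (q :: t).map (pvCnt medal), ∀ c' ∈ (q :: t).map (pvCnt medal), c = c' := by
          by_contra hcon
          push Not at hcon
          obtain ⟨c, hc, c', hc', hne⟩ := hcon
          exact hdist ⟨c, hc, c', hc', hne⟩
        have hfilB : (q :: t).filter
            (fun p => pvCnt medal p == (t.map (pvCnt medal)).foldl max (pvCnt medal q)) = q :: t := by
          rw [List.filter_eq_self]
          intro p hp
          exact beq_iff_eq.mpr
            (heq (pvCnt medal p) (List.mem_map_of_mem hp) _ hmem)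
        rw [hfilB]
        simp

lemma pvTightAux (medal : String) (l : List (String × PySem.Dict String Int))
    (hAll : ∀ c ∈ l.map (pvCnt medal), c ≤ -2)
    (hdist : ∃ c ∈ l.map (pvCnt medal), ∃ c' ∈ l.map (pvCnt medal), c ≠ c')
    (hex : ∃ p ∈ l, p.1 ≠ "None" ∧ ∀ r ∈ l, pvCnt medal r ≤ pvCnt medal p) :
    (if (l.filter (fun p => pvCnt medal p ==
            l.foldl (fun acc p => max acc (pvCnt medal p)) (-1))).map Prod.fst = [] ∨
        (l.filter (fun p => pvCnt medal p ==
            l.foldl (fun acc p => max acc (pvCnt medal p)) (-1))).map Prod.fst = l.map Prod.fst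
     then "None"
     else if ((l.filter (fun p => pvCnt medal p ==
            l.foldl (fun acc p => max acc (pvCnt medal p)) (-1))).map Prod.fst).length = 1
     then ((l.filter (fun p => pvCnt medal p ==
            l.foldl (fun acc p => max acc (pvCnt medal p)) (-1))).map Prod.fst).headD ""
     else PySem.Str.join "/" ((l.filter (fun p => pvCnt medal p ==
            l.foldl (fun acc p => max acc (pvCnt medal p)) (-1))).map Prod.fst)) ≠
    (match PySem.List.max? (l.map (pvCnt medal)) (fun c => c) with
     | none => "None"
     | some max_count =>
       if (l.filter (fun p => pvCnt medal p == max_count)).map Prod.fst = l.map Prod.fst then "None"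
       else if ((l.filter (fun p => pvCnt medal p == max_count)).map Prod.fst).length = 1
       then ((l.filter (fun p => pvCnt medal p == max_count)).map Prod.fst).headD ""
       else PySem.Str.join "/" ((l.filter (fun p => pvCnt medal p == max_count)).map Prod.fst)) := by
  cases l with
  | nil =>
    obtain ⟨c, hc, _⟩ := hdist
    exact absurd hc List.not_mem_nil
  | cons q t =>
    simp only [List.map_cons]
    rw [PySem.List.max?_id_cons]
    have hMval : (q :: t).foldl (fun acc p => max acc (pvCnt medal p)) (-1)
        = max (-1) ((t.map (pvCnt medal)).foldl max (pvCnt medal q)) := by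
      have h1 : ((q :: t).map (pvCnt medal)).foldl max (-1)
          = (q :: t).foldl (fun acc p => max acc (pvCnt medal p)) (-1) := by rw [List.foldl_map]
      rw [← h1, List.map_cons, List.foldl_cons, foldl_max_split]
    simp only [hMval]
    have hmx : PySem.List.max? ((q :: t).map (pvCnt medal)) (fun c => c)
        = some ((t.map (pvCnt medal)).foldl max (pvCnt medal q)) := by
      rw [List.map_cons, PySem.List.max?_id_cons]
    have hmem : (t.map (pvCnt medal)).foldl max (pvCnt medal q) ∈ (q :: t).map (pvCnt medal) :=
      PySem.List.max?_mem hmx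
    have hall : ∀ y ∈ (q :: t).map (pvCnt medal), y ≤ (t.map (pvCnt medal)).foldl max (pvCnt medal q) :=
      PySem.List.max?_isMax hmx
    have hm2 : (t.map (pvCnt medal)).foldl max (pvCnt medal q) ≤ -2 := hAll _ hmem
    simp only [max_eq_left (show (t.map (pvCnt medal)).foldl max (pvCnt medal q) ≤ (-1 : Int) by omega)]
    have hfilA : (q :: t).filter (fun p => pvCnt medal p == (-1 : Int)) = [] := by
      rw [List.filter_eq_nil_iff]
      intro p hp
      have := hAll (pvCnt medal p) (List.mem_map_of_mem hp)
      simp only [beq_iff_eq]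
      omega
    rw [hfilA, if_pos (Or.inl (by simp))]
    obtain ⟨p, hp, hpN, hpmax⟩ := hex
    have hpm : pvCnt medal p = (t.map (pvCnt medal)).foldl max (pvCnt medal q) := by
      obtain ⟨r, hr, hrc⟩ := List.mem_map.mp hmem
      have h1 := hpmax r hr
      have h2 := hall (pvCnt medal p) (List.mem_map_of_mem hp)
      omega
    have hpF : p ∈ (q :: t).filter
        (fun p => pvCnt medal p == (t.map (pvCnt medal)).foldl max (pvCnt medal q)) :=
      List.mem_filter.mpr ⟨hp, beq_iff_eq.mpr hpm⟩
    have hBK : ¬ ((q :: t).filter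
        (fun p => pvCnt medal p == (t.map (pvCnt medal)).foldl max (pvCnt medal q))).map Prod.fst
        = q.1 :: t.map Prod.fst := by
      intro h
      have hlen : ((q :: t).filter
          (fun p => pvCnt medal p == (t.map (pvCnt medal)).foldl max (pvCnt medal q))).length
          = (q :: t).length := by
        have := congrArg List.length h
        simpa using this
      have hfeq : (q :: t).filter
          (fun p => pvCnt medal p == (t.map (pvCnt medal)).foldl max (pvCnt medal q)) = q :: t :=
        (List.filter_sublist).eq_of_length hlen
      have hallm := List.filter_eq_self.mp hfeq
      obtain ⟨c, hc, c', hc', hne⟩ := hdist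
      obtain ⟨r, hr, rfl⟩ := List.mem_map.mp hc
      obtain ⟨r', hr', rfl⟩ := List.mem_map.mp hc'
      have e1 := beq_iff_eq.mp (hallm r hr)
      have e2 := beq_iff_eq.mp (hallm r' hr')
      exact hne (e1.trans e2.symm)
    rw [if_neg hBK]
    have hpmem : p.1 ∈ ((q :: t).filter
        (fun p => pvCnt medal p == (t.map (pvCnt medal)).foldl max (pvCnt medal q))).map Prod.fst :=
      List.mem_map_of_mem hpF
    revert hpmem
    cases hF : ((q :: t).filter
        (fun p => pvCnt medal p == (t.map (pvCnt medal)).foldl max (pvCnt medal q))).map Prod.fst with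
    | nil => intro hm; exact absurd hm List.not_mem_nil
    | cons sx rest =>
      intro hpmem
      cases rest with
      | nil =>
        rw [if_pos (by simp)]
        simp only [List.mem_singleton] at hpmem
        simp only [List.headD_cons]
        exact fun h => hpN (hpmem.trans h.symm)
      | cons sy r2 =>
        rw [if_neg (by simp)]
        exact Ne.symm (join_ne_none sx sy r2)

-- ===== VERDICT (by name: the statement is the Claim_ definition above) =====
theorem find_best_country_in_sport_spec : Claim_unchanged_find_best_country_in_sport := by
  intro results medal _ hpre
  unfold Spec_find_best_country_in_sport
  intro hD
  unfold D_find_best_country_in_sport at hD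
  simp only at hD
  have hD' : ¬((medal = "Gold" ∨ medal = "Silver" ∨ medal = "Bronze") ∧
      (∀ c ∈ ((pvDictOf results).items).map (pvCnt medal), c ≤ -2) ∧
      (∃ c ∈ ((pvDictOf results).items).map (pvCnt medal),
        ∃ c' ∈ ((pvDictOf results).items).map (pvCnt medal), c ≠ c') ∧
      ∃ p ∈ (pvDictOf results).items, p.1 ≠ "None" ∧
        ∀ r ∈ (pvDictOf results).items, pvCnt medal r ≤ pvCnt medal p) := by
    rintro ⟨_, hAll, hdist, p, hp, hpN, hpmax⟩
    apply hD
    refine ⟨p, hp, hpN, hAll _ (List.mem_map_of_mem hp), hpmax, ?_⟩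
    obtain ⟨c, hc, c', hc', hne⟩ := hdist
    obtain ⟨r, hr, rfl⟩ := List.mem_map.mp hc
    obtain ⟨r', hr', rfl⟩ := List.mem_map.mp hc'
    by_cases h : pvCnt medal r = pvCnt medal p
    · exact ⟨r', hr', fun h' => hne (h.trans h'.symm)⟩
    · exact ⟨r, hr, h⟩
  unfold find_best_country_in_sport find_best_country_in_sport_alt
  simp only [PySem.Dict.keys]
  rw [loop_spec]
  simp only [ite_self, List.nil_append]
  exact pvMainAux medal hpre.1 (pvDictOf results).items
    (PySem.Dict.nodup_keys_ofList _) hD' 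

theorem find_best_country_in_sport_changed : Claim_changed_find_best_country_in_sport := by
  unfold Claim_changed_find_best_country_in_sport; decide

theorem find_best_country_in_sport_tight : Claim_exact_find_best_country_in_sport := by
  intro results medal _ hpre hD
  unfold D_find_best_country_in_sport at hD
  simp only at hD
  obtain ⟨p, hp, hpN, hp2, hpmax, r, hr, hrne⟩ := hD
  unfold find_best_country_in_sport find_best_country_in_sport_alt
  simp only [PySem.Dict.keys]
  rw [loop_spec]
  simp only [ite_self, List.nil_append]
  refine pvTightAux medal (pvDictOf results).items ?_ ?_ ⟨p, hp, hpN, hpmax⟩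
  · intro c hc
    obtain ⟨r', hr', rfl⟩ := List.mem_map.mp hc
    exact le_trans (hpmax r' hr') hp2
  · exact ⟨pvCnt medal r, List.mem_map_of_mem hr, pvCnt medal p, List.mem_map_of_mem hp, hrne⟩
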